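-- pv_equiv track=rewrite | github.com/henriquebonfim/omni-trader-hub | .agent/skills/pr-review-orchestrator/scripts/post_review.py | build_review_body
-- ===== SOURCE A (Python) =====
-- def build_review_body(runtime: dict | None, issues: list[dict], risk_level: str) -> str:
--     lines = [f"## Code Review\n\n**Overall Risk:** {risk_level}\n"]
--
--     if runtime:
--         lines.append("### Runtime Validation\n")
--         status_emoji = {"PASS": "✅", "FAIL": "❌", "N/A": "⏭"}
--         for key in ("build", "lint", "typecheck", "tests", "runtime"):
--             val = runtime.get(key, "N/A")
--             emoji = status_emoji.get(val, "❓")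
--             lines.append(f"- **{key.title()}:** {emoji} {val}")
--         lines.append("")
--
--     if not issues:
--         lines.append("### Summary\n\nNo issues detected in modified files. All validation passes. ✅")
--     else:
--         count = len(issues)
--         high = sum(1 for i in issues if i.get("severity") == "HIGH")
--         med = sum(1 for i in issues if i.get("severity") == "MEDIUM")
--         low = sum(1 for i in issues if i.get("severity") == "LOW")
--         lines.append(f"### Summary\n\n{count} issue(s) found: {high} HIGH, {med} MEDIUM, {low} LOW\n\nSee inline comments for details.")
--
--     return "\n".join(lines)
-- ===== SOURCE B (Python) =====
-- def build_review_body(runtime: dict | None, issues: list[dict], risk_level: str) -> str: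
--     body = f"## Code Review\n\n**Overall Risk:** {risk_level}\n"
--
--     if runtime:
--         body += "\n### Runtime Validation\n"
--         for key in ("build", "lint", "typecheck", "tests", "runtime"):
--             val = runtime.get(key, "N/A")
--             emoji = {"PASS": "✅", "FAIL": "❌", "N/A": "⏭"}.get(val, "❓")
--             body += f"\n- **{key.title()}:** {emoji} {val}"
--         body += "\n"
--
--     if not issues:
--         return body + "\n### Summary\n\nNo issues detected in modified files. All validation passes. ✅"
--
--     high = med = low = 0
--     for i in issues:
--         s = i.get("severity")
--         if s == "HIGH":
--             high += 1
--         elif s == "MEDIUM":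
--             med += 1
--         elif s == "LOW":
--             low += 1
--     return body + (
--         f"\n### Summary\n\n{len(issues)} issue(s) found: "
--         f"{high} HIGH, {med} MEDIUM, {low} LOW\n\nSee inline comments for details."
--     )
-- ===== Notes on version B (the rewrite author's own statement) =====
-- stated objective: alternative
-- what changed: B abandons A's list-of-lines plus final '\n'.join decomposition for a direct string accumulator with an early return on the no-issues branch, and replaces A's three separate per-severity sum(...) scans with one pass over issues maintaining the three counters together.
import Mathlib
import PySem

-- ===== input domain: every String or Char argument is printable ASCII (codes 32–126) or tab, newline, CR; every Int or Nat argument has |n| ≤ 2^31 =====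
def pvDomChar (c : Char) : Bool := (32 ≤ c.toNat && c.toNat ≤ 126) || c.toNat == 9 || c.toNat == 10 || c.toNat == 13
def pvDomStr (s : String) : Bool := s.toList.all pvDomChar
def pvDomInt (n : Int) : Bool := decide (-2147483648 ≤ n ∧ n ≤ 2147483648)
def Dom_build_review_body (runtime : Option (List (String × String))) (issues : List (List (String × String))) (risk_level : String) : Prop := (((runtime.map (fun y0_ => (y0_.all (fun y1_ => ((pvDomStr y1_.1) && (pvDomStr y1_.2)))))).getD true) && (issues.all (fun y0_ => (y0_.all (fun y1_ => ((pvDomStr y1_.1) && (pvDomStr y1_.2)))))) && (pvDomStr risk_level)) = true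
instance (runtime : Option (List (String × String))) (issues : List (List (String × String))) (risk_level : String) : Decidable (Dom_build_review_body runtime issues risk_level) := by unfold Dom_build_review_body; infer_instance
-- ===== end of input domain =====

-- B drops A's list-of-lines + "\n".join machinery in favour of a direct string accumulator
-- with an early return, and folds A's three per-severity sum-scans into one pass keeping
-- three counters (objective: alternative).


-- ===== PORT A =====
-- shared library helper: Python str.title(), exact on ASCII letters (all it is applied
-- to here are the five literal lowercase keys)
def pyTitleGo : Bool → List Char → List Char
  | _, [] => []
  | prev, c :: rest =>
    let n := c.toNat
    let isAl := (97 ≤ n && n ≤ 122) || (65 ≤ n && n ≤ 90)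
    let c' := if isAl then
        (if prev then (if 65 ≤ n && n ≤ 90 then Char.ofNat (n + 32) else c)
         else (if 97 ≤ n && n ≤ 122 then Char.ofNat (n - 32) else c))
      else c
    c' :: pyTitleGo isAl rest

def pyTitle (s : String) : String := String.ofList (pyTitleGo false s.toList)

-- A's for-loop over the key tuple, appending one line per key to the `lines` list
def runtimeLinesA (d : List (String × String)) : List String :=
  ["build", "lint", "typecheck", "tests", "runtime"].foldl (fun acc key =>
    let val := (PySem.Dict.mk d).getD key "N/A"
    let emoji := (PySem.Dict.mk [("PASS", "✅"), ("FAIL", "❌"), ("N/A", "⏭")]).getD val "❓"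
    acc ++ ["- **" ++ pyTitle key ++ ":** " ++ emoji ++ " " ++ val]) []

def build_review_body (runtime : Option (List (String × String))) (issues : List (List (String × String))) (risk_level : String) : String :=
  let lines : List String := ["## Code Review\n\n**Overall Risk:** " ++ risk_level ++ "\n"]
  let lines := match runtime with   -- `if runtime:` — truthy iff present and non-empty
    | some d => if d.isEmpty then lines
        else lines ++ ["### Runtime Validation\n"] ++ runtimeLinesA d ++ [""]
    | none => lines
  let lines := if issues.isEmpty then
      lines ++ ["### Summary\n\nNo issues detected in modified files. All validation passes. ✅"]
    else
      let count : Int := issues.length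
      let high : Int := issues.foldl (fun n i => if (PySem.Dict.mk i).get? "severity" == some "HIGH" then n + 1 else n) 0
      let med : Int := issues.foldl (fun n i => if (PySem.Dict.mk i).get? "severity" == some "MEDIUM" then n + 1 else n) 0
      let low : Int := issues.foldl (fun n i => if (PySem.Dict.mk i).get? "severity" == some "LOW" then n + 1 else n) 0
      lines ++ ["### Summary\n\n" ++ PySem.Int.toStr count ++ " issue(s) found: " ++ PySem.Int.toStr high ++ " HIGH, " ++ PySem.Int.toStr med ++ " MEDIUM, " ++ PySem.Int.toStr low ++ " LOW\n\nSee inline comments for details."]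
  PySem.Str.join "\n" lines

-- ===== PORT B =====
-- B's single counting pass: one fold carrying the (high, med, low) triple
def sevTally (issues : List (List (String × String))) : Int × Int × Int :=
  issues.foldl (fun t i =>
    let s := (PySem.Dict.mk i).get? "severity"
    if s == some "HIGH" then (t.1 + 1, t.2.1, t.2.2)
    else if s == some "MEDIUM" then (t.1, t.2.1 + 1, t.2.2)
    else if s == some "LOW" then (t.1, t.2.1, t.2.2 + 1)
    else t) (0, 0, 0)

def build_review_body_alt (runtime : Option (List (String × String))) (issues : List (List (String × String))) (risk_level : String) : String :=
  let body := "## Code Review\n\n**Overall Risk:** " ++ risk_level ++ "\n"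
  let body := match runtime with
    | some d => if d.isEmpty then body
        else
          let body := body ++ "\n### Runtime Validation\n"
          let body := ["build", "lint", "typecheck", "tests", "runtime"].foldl (fun b key =>
            let val := (PySem.Dict.mk d).getD key "N/A"
            let emoji := (PySem.Dict.mk [("PASS", "✅"), ("FAIL", "❌"), ("N/A", "⏭")]).getD val "❓"
            b ++ "\n- **" ++ pyTitle key ++ ":** " ++ emoji ++ " " ++ val) body
          body ++ "\n"
    | none => body
  if issues.isEmpty then
    body ++ "\n### Summary\n\nNo issues detected in modified files. All validation passes. ✅"
  else
    let t := sevTally issues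
    body ++ "\n### Summary\n\n" ++ PySem.Int.toStr (issues.length : Int) ++ " issue(s) found: " ++
      PySem.Int.toStr t.1 ++ " HIGH, " ++ PySem.Int.toStr t.2.1 ++ " MEDIUM, " ++
      PySem.Int.toStr t.2.2 ++ " LOW\n\nSee inline comments for details."

-- ===== PRECONDITION & SPEC =====
def Spec_build_review_body (runtime : Option (List (String × String))) (issues : List (List (String × String))) (risk_level : String) (out : String) : Prop := out = build_review_body_alt runtime issues risk_level
instance (runtime : Option (List (String × String))) (issues : List (List (String × String))) (risk_level : String) (out : String) : Decidable (Spec_build_review_body runtime issues risk_level out) := by unfold Spec_build_review_body; infer_instance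

-- ===== CLAIM =====
def Claim_equal_build_review_body : Prop := ∀ (runtime : Option (List (String × String))) (issues : List (List (String × String))) (risk_level : String), Dom_build_review_body runtime issues risk_level → Spec_build_review_body runtime issues risk_level (build_review_body runtime issues risk_level)

-- ===== LEMMAS AND PROOFS =====

-- "\n".join peeled one element at a time
lemma join_cons₂ (a b : String) (t : List String) :
    PySem.Str.join "\n" (a :: b :: t) = a ++ "\n" ++ PySem.Str.join "\n" (b :: t) := by
  simp [PySem.Str.join, PySem.Chars.join_cons_cons, String.ofList_append, String.append_assoc]
  rw [show ('\n' :: PySem.Chars.join ['\n'] (b.toList :: List.map String.toList t)) =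
        ['\n'] ++ PySem.Chars.join ['\n'] (b.toList :: List.map String.toList t) from rfl,
      String.ofList_append]

lemma join_singleton (a : String) : PySem.Str.join "\n" [a] = a := by
  simp [PySem.Str.join, PySem.Chars.join_singleton]

-- B's one tally pass computes exactly A's three separate conditional-sum folds
lemma sevTally_eq (issues : List (List (String × String))) :
    sevTally issues =
      (issues.foldl (fun n i => if (PySem.Dict.mk i).get? "severity" == some "HIGH" then n + 1 else n) 0,
       issues.foldl (fun n i => if (PySem.Dict.mk i).get? "severity" == some "MEDIUM" then n + 1 else n) 0,
       issues.foldl (fun n i => if (PySem.Dict.mk i).get? "severity" == some "LOW" then n + 1 else n) 0) := by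
  have aux : ∀ (l : List (List (String × String))) (h m lo : Int),
      l.foldl (fun t i =>
        let s := (PySem.Dict.mk i).get? "severity"
        if s == some "HIGH" then (t.1 + 1, t.2.1, t.2.2)
        else if s == some "MEDIUM" then (t.1, t.2.1 + 1, t.2.2)
        else if s == some "LOW" then (t.1, t.2.1, t.2.2 + 1)
        else t) (h, m, lo) =
      (l.foldl (fun n i => if (PySem.Dict.mk i).get? "severity" == some "HIGH" then n + 1 else n) h,
       l.foldl (fun n i => if (PySem.Dict.mk i).get? "severity" == some "MEDIUM" then n + 1 else n) m,
       l.foldl (fun n i => if (PySem.Dict.mk i).get? "severity" == some "LOW" then n + 1 else n) lo) := by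
    intro l
    induction l with
    | nil => intro h m lo; rfl
    | cons i rest ih =>
      intro h m lo
      simp only [List.foldl_cons]
      by_cases hH : (PySem.Dict.mk i).get? "severity" == some "HIGH" <;>
        by_cases hM : (PySem.Dict.mk i).get? "severity" == some "MEDIUM" <;>
          by_cases hL : (PySem.Dict.mk i).get? "severity" == some "LOW" <;>
            simp_all
  exact aux issues 0 0 0

-- ===== VERDICT =====
theorem build_review_body_spec : Claim_equal_build_review_body := by
  intro runtime issues risk_level _
  show build_review_body runtime issues risk_level = build_review_body_alt runtime issues risk_level
  unfold build_review_body build_review_body_alt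
  rw [sevTally_eq]
  rcases runtime with _ | d
  · rcases issues with _ | ⟨i, rest⟩ <;>
      simp [join_cons₂, join_singleton, String.append_assoc] <;>
      (apply String.toList_inj.mp; simp [String.toList_append])
  · by_cases hd : d.isEmpty
    · simp only [hd, if_true]
      rcases issues with _ | ⟨i, rest⟩ <;>
        simp [join_cons₂, join_singleton, String.append_assoc] <;>
        (apply String.toList_inj.mp; simp [String.toList_append])
    · simp only [hd]
      simp only [runtimeLinesA, List.foldl]
      rcases issues with _ | ⟨i, rest⟩ <;>
        simp [join_cons₂, join_singleton, String.append_assoc] <;>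
        (apply String.toList_inj.mp; simp [String.toList_append])
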